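-- pv_equiv track=rewrite | github.com/NicolasUpsud/Cryptographie | Code Message4.py | frequence1
-- ===== SOURCE A (Python) =====
-- def frequence1(texte):
--     liste = list(texte)
--     del liste[0:len(liste):2]
--     liste1 = liste
--     dictionnaire = {}
--     for i in liste1:
--         dictionnaire[i] = liste1.count(i)
--     return dictionnaire
-- ===== SOURCE B (Python) =====
-- def frequence1(texte):
--     dictionnaire = {}
--     for c in texte[1::2]:
--         dictionnaire[c] = dictionnaire.get(c, 0) + 1
--     return dictionnaire
-- ===== Notes on version B (the rewrite author's own statement) =====
-- stated objective: faster
-- what changed: Replaces A's list materialisation + slice-deletion + per-element list.count rescans with a single running-counter pass over the slice texte[1::2].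
import Mathlib
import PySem

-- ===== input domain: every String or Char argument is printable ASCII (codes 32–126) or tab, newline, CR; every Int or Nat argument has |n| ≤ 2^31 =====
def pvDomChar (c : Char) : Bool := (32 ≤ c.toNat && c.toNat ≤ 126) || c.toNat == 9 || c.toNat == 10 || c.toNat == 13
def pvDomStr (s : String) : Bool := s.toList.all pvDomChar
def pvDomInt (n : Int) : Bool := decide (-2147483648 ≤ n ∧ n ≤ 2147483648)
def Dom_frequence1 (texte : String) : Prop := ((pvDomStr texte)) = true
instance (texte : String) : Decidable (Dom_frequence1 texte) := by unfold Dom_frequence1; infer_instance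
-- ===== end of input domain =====

-- B replaces A's per-element list.count rescans with one running-counter pass over texte[1::2].

-- ===== PORT A =====
-- 'del liste[0:len(liste):2]' deletes the elements at indices 0,2,4,…; this recursion drops
-- one element and keeps the next, exactly that deletion.
def pvDelEvens {α : Type} : List α → List α
  | [] => []
  | [_] => []
  | _ :: b :: t => b :: pvDelEvens t

def frequence1 (texte : String) : List (String × Int) :=
  let liste := texte.toList
  let liste1 := pvDelEvens liste
  let dictionnaire :=
    liste1.foldl (fun d i => d.insert (String.ofList [i]) ((liste1.count i : Nat) : Int))
      PySem.Dict.empty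
  dictionnaire.items

-- ===== PORT B =====
def frequence1_alt (texte : String) : List (String × Int) :=
  let chars := (PySem.List.slice? texte.toList (some 1) none 2).getD []
  let dictionnaire :=
    chars.foldl
      (fun d c => d.insert (String.ofList [c]) (d.getD (String.ofList [c]) 0 + 1))
      PySem.Dict.empty
  dictionnaire.items

-- ===== PRECONDITION & SPEC =====
def Spec_frequence1 (texte : String) (out : List (String × Int)) : Prop := out = frequence1_alt texte
instance (texte : String) (out : List (String × Int)) : Decidable (Spec_frequence1 texte out) := by unfold Spec_frequence1; infer_instance

-- ===== CLAIM (what is proved, stated in full; the proofs are below) =====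
def Claim_equal_frequence1 : Prop := ∀ (texte : String), Dom_frequence1 texte → Spec_frequence1 texte (frequence1 texte)

-- ===== LEMMAS AND PROOFS =====

theorem pvSliceOddAux {α : Type} :
    ∀ (l : List α),
      (List.range (l.length / 2)).filterMap (fun k => l[2 * k + 1]?) = pvDelEvens l
  | [] => by simp [pvDelEvens]
  | [_] => by simp [pvDelEvens]
  | a :: b :: t => by
      have ih := pvSliceOddAux t
      have hlen : (a :: b :: t).length / 2 = t.length / 2 + 1 := by
        simp only [List.length_cons]; omega
      rw [hlen, List.range_succ_eq_map, List.filterMap_cons, List.filterMap_map]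
      have hstep : ((fun k => (a :: b :: t)[2 * k + 1]?) ∘ Nat.succ)
          = (fun k => t[2 * k + 1]?) := by
        funext k
        show (a :: b :: t)[2 * (k + 1) + 1]? = t[2 * k + 1]?
        have : 2 * (k + 1) + 1 = 2 * k + 1 + 1 + 1 := by omega
        rw [this]
        simp
      rw [hstep, ih]
      simp [pvDelEvens]

-- texte[1::2] is exactly the list left by deleting the even indices
theorem pvSliceOdd {α : Type} (l : List α) :
    (PySem.List.slice? l (some 1) none 2).getD [] = pvDelEvens l := by
  have haux := pvSliceOddAux l
  unfold PySem.List.slice? PySem.List.sliceIndices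
  norm_num
  by_cases h : 1 < l.length
  · have h1 : (1 : Int) ≤ (l.length : Int) := by exact_mod_cast Nat.one_le_iff_ne_zero.mpr (by omega)
    rw [min_eq_left h1]
    rw [if_pos h]
    have hc : (((l.length : Int) - 1 + 2 - 1) / 2).toNat = l.length / 2 := by
      have : ((l.length : Int) - 1 + 2 - 1) = (l.length : Int) := by ring
      rw [this]
      omega
    rw [hc]
    rw [show (fun x : Nat => l[((1 : Int) + 2 * (x : Int)).toNat]?)
          = (fun x : Nat => l[2 * x + 1]?) from funext (fun x => by
        congr 1
        omega)]
    exact haux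
  · rw [if_neg h]
    simp only [List.range_zero, List.filterMap_nil]
    match l, h with
    | [], _ => rfl
    | [a], _ => rfl
    | a :: b :: t, h => exact absurd (by simp only [List.length_cons]; omega) h

theorem pvContainsTab {κ : Type} [BEq κ] [LawfulBEq κ] (g : κ → Int) (S : List κ) (x : κ) :
    (PySem.Dict.mk (S.map (fun k => (k, g k))) : PySem.Dict κ Int).contains x
      = decide (x ∈ S) := by
  simp only [PySem.Dict.contains, List.any_map]
  induction S with
  | nil => rfl
  | cons a S ih =>
      rw [List.any_cons, ih]; rw [Bool.eq_iff_iff]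
      simp only [Function.comp, Bool.or_eq_true, beq_iff_eq, decide_eq_true_eq, List.mem_cons]
      constructor <;> rintro (h | h) <;> simp [h, eq_comm]

-- a loop inserting the tabulated value g x for every x of m behaves as tabulating the set-fold
theorem pvFoldlInsertTab {κ : Type} [BEq κ] [LawfulBEq κ] (g : κ → Int) :
    ∀ (m : List κ) (S : PySem.Set κ),
      (m.foldl (fun d x => d.insert x (g x))
          (PySem.Dict.mk (S.map (fun k => (k, g k))))).items
        = (m.foldl PySem.Set.add S).map (fun k => (k, g k))
  | [], S => by simp
  | x :: m, S => by
      by_cases hx : x ∈ S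
      · have hins : (PySem.Dict.mk (S.map (fun k => (k, g k))) : PySem.Dict κ Int).insert x (g x)
            = PySem.Dict.mk (S.map (fun k => (k, g k))) := by
          apply PySem.Dict.ext
          rw [PySem.Dict.items_insert_of_contains _ _ (by rw [pvContainsTab]; simpa using hx)]
          simp only [List.map_map]
          apply List.map_congr_left
          intro k _
          simp only [Function.comp]
          split
          · next h => simp at h; subst h; rfl
          · rfl
        have hadd : PySem.Set.add S x = S := by
          simp [PySem.Set.add, hx]
        simp only [List.foldl_cons]
        rw [show (PySem.Dict.mk (List.map (fun k => (k, g k)) S)).insert x (g x)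
              = PySem.Dict.mk (List.map (fun k => (k, g k)) (PySem.Set.add S x)) from by
            rw [hins, hadd]]
        exact pvFoldlInsertTab g m (PySem.Set.add S x)
      · have hins : (PySem.Dict.mk (S.map (fun k => (k, g k))) : PySem.Dict κ Int).insert x (g x)
            = PySem.Dict.mk ((PySem.Set.add S x).map (fun k => (k, g k))) := by
          apply PySem.Dict.ext
          rw [PySem.Dict.items_insert_of_not_contains _ _ (by rw [pvContainsTab]; simpa using hx)]
          simp [PySem.Set.add, hx]
        simp only [List.foldl_cons]
        rw [hins]
        exact pvFoldlInsertTab g m (PySem.Set.add S x)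

theorem pvStrMkInj : Function.Injective (fun c : Char => String.ofList [c]) := by
  intro a b h
  have h2 := congrArg String.toList h
  simp only [String.toList_ofList] at h2
  exact List.singleton_injective h2

-- ===== VERDICT (by name: the statement is the Claim_ definition above) =====
theorem frequence1_spec : Claim_equal_frequence1 := by
  unfold Claim_equal_frequence1
  intro texte _
  unfold Spec_frequence1 frequence1 frequence1_alt
  simp only [pvSliceOdd]
  set m0 := pvDelEvens texte.toList with hm0
  set f : Char → String := fun c => String.ofList [c] with hf
  -- B side: running counter = counter (m0.map f)
  have hB :
      (m0.foldl (fun d c => d.insert (f c) (d.getD (f c) 0 + 1)) (PySem.Dict.empty : PySem.Dict String Int)).items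
        = (PySem.Set.ofList (m0.map f)).map (fun k => (k, ((m0.map f).count k : Int))) := by
    rw [show m0.foldl (fun d c => d.insert (f c) (d.getD (f c) 0 + 1)) (PySem.Dict.empty : PySem.Dict String Int)
          = (m0.map f).foldl (fun d x => d.insert x (d.getD x 0 + 1)) (PySem.Dict.empty : PySem.Dict String Int) from
        (List.foldl_map (f := f) (g := fun (d : PySem.Dict String Int) s => d.insert s (d.getD s 0 + 1)) (l := m0) (init := PySem.Dict.empty)).symm]
    rw [PySem.Dict.foldl_insert_getD_add_one_eq_counter]
    exact PySem.Dict.items_counter (m0.map f)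
  -- A side: inserting the final counts tabulates the same map
  have hA :
      (m0.foldl (fun d i => d.insert (f i) ((m0.count i : Nat) : Int)) (PySem.Dict.empty : PySem.Dict String Int)).items
        = (PySem.Set.ofList (m0.map f)).map (fun k => (k, ((m0.map f).count k : Int))) := by
    have hcnt : ∀ i : Char, ((m0.count i : Nat) : Int) = (((m0.map f).count (f i) : Nat) : Int) := by
      intro i
      rw [List.count_map_of_injective m0 f pvStrMkInj]
    rw [show (fun (d : PySem.Dict String Int) (i : Char) => d.insert (f i) ((m0.count i : Nat) : Int))
          = (fun d i => d.insert (f i) (((m0.map f).count (f i) : Nat) : Int)) from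
        funext (fun d => funext (fun i => by rw [hcnt i]))]
    rw [show m0.foldl (fun d i => d.insert (f i) (((m0.map f).count (f i) : Nat) : Int)) (PySem.Dict.empty : PySem.Dict String Int)
          = (m0.map f).foldl (fun d x => d.insert x (((m0.map f).count x : Nat) : Int)) (PySem.Dict.empty : PySem.Dict String Int) from
        (List.foldl_map (f := f) (g := fun (d : PySem.Dict String Int) x => d.insert x (((m0.map f).count x : Nat) : Int)) (l := m0) (init := PySem.Dict.empty)).symm]
    have := pvFoldlInsertTab (fun x => (((m0.map f).count x : Nat) : Int)) (m0.map f) []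
    simpa [PySem.Set.ofList_eq_foldl, PySem.Dict.empty] using this
  rw [hA, hB]
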